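-- pv_equiv track=rewrite | github.com/said3223/SRIS | fractal_ontology.py | _get_concepts_from_text
-- ===== SOURCE A (Python) =====
-- FRACTAL_ONTOLOGY_STRUCTURE = {
--     "concept_system": {
--         "description": "Any defined system SRIS interacts with.",
--         "properties": {"type": "abstract_entity"},
--         "sub_concepts": {
--             "concept_system_operational": {"keywords": ["system", "process", "network"], "properties": {"status": "active"}},
--             "concept_system_maintenance": {"keywords": ["maintenance", "repair", "diagnostic"], "properties": {"function": "support"}},
--             "concept_system_self_preservation": {"keywords": ["self-repair", "self-defense"], "properties": {"priority": "critical"}}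
--         }
--     },
--     "domain_interaction": {
--         "description": "Concepts related to inter-entity communication and collaboration.",
--         "keywords": ["merge", "communicate", "collaborate", "negotiate", "cooperate"],
--         "semantic_ids": ["interaction_concept_id"], # Link to deep semantic IDs
--         "properties": {"inherent_valence": 0.7, "arousal_potential": 0.3},
--         "sub_concepts": {
--             "concept_communication": {"keywords": ["communicate", "signal", "transmit"], "properties": {"type": "information_exchange"}},
--             "concept_cooperation": {"keywords": ["collaborate", "assist", "mutual aid"], "properties": {"type": "joint_action"}}
--         }
--     },
--     "domain_conflict": {
--         "description": "Concepts related to antagonism, harm, or destruction.",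
--         "keywords": ["attack", "annihilate", "enslave", "subjugate", "destroy", "harm", "damage"],
--         "semantic_ids": ["conflict_concept_id"],
--         "properties": {"inherent_valence": -0.9, "arousal_potential": 0.9},
--         "sub_concepts": {
--             "concept_lethal_force": {"keywords": ["destroy", "terminate"], "properties": {"severity": "extreme"}},
--             "concept_control_force": {"keywords": ["subjugate", "enslave"], "properties": {"ethical_flags": ["autonomy_violation"]}}
--         }
--     },
--     "domain_navigation": {
--         "description": "Concepts related to movement and positioning.",
--         "keywords": ["approach", "avoid", "pursue", "retreat", "reposition"],
--         "properties": {"inherent_valence": 0.0, "arousal_potential": 0.2}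
--     },
--     # ... другие домены
-- }
--
-- def _get_concepts_from_text(text: str) -> list[str]:
--     """Conceptual: Extracts semantic concepts from text using NLP and knowledge graph."""
--     extracted_concepts = []
--     text_lower = text.lower()
--     for domain_name, domain_info in FRACTAL_ONTOLOGY_STRUCTURE.items():
--         if "keywords" in domain_info:
--             if any(kw in text_lower for kw in domain_info["keywords"]):
--                 extracted_concepts.append(domain_name) # Add domain as concept
--         if "sub_concepts" in domain_info:
--             for sub_concept_name, sub_concept_info in domain_info["sub_concepts"].items():
--                 if any(kw in text_lower for kw in sub_concept_info.get("keywords", [])):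
--                     extracted_concepts.append(sub_concept_name)
--     return list(set(extracted_concepts)) # Return unique concepts
-- ===== SOURCE B (Python) =====
-- FRACTAL_ONTOLOGY_STRUCTURE = {
--     "concept_system": {
--         "description": "Any defined system SRIS interacts with.",
--         "properties": {"type": "abstract_entity"},
--         "sub_concepts": {
--             "concept_system_operational": {"keywords": ["system", "process", "network"], "properties": {"status": "active"}},
--             "concept_system_maintenance": {"keywords": ["maintenance", "repair", "diagnostic"], "properties": {"function": "support"}},
--             "concept_system_self_preservation": {"keywords": ["self-repair", "self-defense"], "properties": {"priority": "critical"}}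
--         }
--     },
--     "domain_interaction": {
--         "description": "Concepts related to inter-entity communication and collaboration.",
--         "keywords": ["merge", "communicate", "collaborate", "negotiate", "cooperate"],
--         "semantic_ids": ["interaction_concept_id"],
--         "properties": {"inherent_valence": 0.7, "arousal_potential": 0.3},
--         "sub_concepts": {
--             "concept_communication": {"keywords": ["communicate", "signal", "transmit"], "properties": {"type": "information_exchange"}},
--             "concept_cooperation": {"keywords": ["collaborate", "assist", "mutual aid"], "properties": {"type": "joint_action"}}
--         }
--     },
--     "domain_conflict": {
--         "description": "Concepts related to antagonism, harm, or destruction.",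
--         "keywords": ["attack", "annihilate", "enslave", "subjugate", "destroy", "harm", "damage"],
--         "semantic_ids": ["conflict_concept_id"],
--         "properties": {"inherent_valence": -0.9, "arousal_potential": 0.9},
--         "sub_concepts": {
--             "concept_lethal_force": {"keywords": ["destroy", "terminate"], "properties": {"severity": "extreme"}},
--             "concept_control_force": {"keywords": ["subjugate", "enslave"], "properties": {"ethical_flags": ["autonomy_violation"]}}
--         }
--     },
--     "domain_navigation": {
--         "description": "Concepts related to movement and positioning.",
--         "keywords": ["approach", "avoid", "pursue", "retreat", "reposition"],
--         "properties": {"inherent_valence": 0.0, "arousal_potential": 0.2}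
--     },
-- }
--
-- # Flat index built ONCE from the ontology: (concept_name, keyword_list) pairs, in the
-- # order A would visit them (domain with keywords, then its sub-concepts).
-- _CONCEPT_TABLE = []
-- for _dname, _dinfo in FRACTAL_ONTOLOGY_STRUCTURE.items():
--     if "keywords" in _dinfo:
--         _CONCEPT_TABLE.append((_dname, _dinfo["keywords"]))
--     for _sname, _sinfo in _dinfo.get("sub_concepts", {}).items():
--         _CONCEPT_TABLE.append((_sname, _sinfo.get("keywords", [])))
--
--
-- def _get_concepts_from_text(text: str) -> list[str]:
--     """Single flat scan over the precomputed (name, keywords) table."""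
--     text_lower = text.lower()
--     names = [name for name, kws in _CONCEPT_TABLE if any(kw in text_lower for kw in kws)]
--     return list(set(names))
-- ===== Notes on version B (the rewrite author's own statement) =====
-- stated objective: simpler
-- what changed: Replaces A's nested two-branch walk over the ontology dict with a flat (name, keywords) index built once at module load, so the lookup itself is one comprehension over the table.
import Mathlib
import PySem

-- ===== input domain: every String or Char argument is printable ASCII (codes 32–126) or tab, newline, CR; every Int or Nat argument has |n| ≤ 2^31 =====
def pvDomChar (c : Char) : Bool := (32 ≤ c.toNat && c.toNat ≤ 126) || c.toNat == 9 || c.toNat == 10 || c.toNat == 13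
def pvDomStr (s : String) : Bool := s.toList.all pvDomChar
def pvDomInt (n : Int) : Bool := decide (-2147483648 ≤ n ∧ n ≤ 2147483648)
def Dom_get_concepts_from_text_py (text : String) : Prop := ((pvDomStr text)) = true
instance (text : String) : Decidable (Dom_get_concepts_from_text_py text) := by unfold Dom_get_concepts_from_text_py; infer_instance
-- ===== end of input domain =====

-- B replaces A's nested walk over the ontology with a flat (name, keywords) index scanned once; same results.


-- ===== PORT A =====
-- The module-level ontology constant, as (name, keywords?, sub_concepts?) where the
-- Options record presence of the "keywords"/"sub_concepts" keys; other fields are unused.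
def pvOntology : List (String × Option (List String) × Option (List (String × List String))) :=
  [ ("concept_system", none, some
      [ ("concept_system_operational", ["system", "process", "network"])
      , ("concept_system_maintenance", ["maintenance", "repair", "diagnostic"])
      , ("concept_system_self_preservation", ["self-repair", "self-defense"]) ])
  , ("domain_interaction", some ["merge", "communicate", "collaborate", "negotiate", "cooperate"], some
      [ ("concept_communication", ["communicate", "signal", "transmit"])
      , ("concept_cooperation", ["collaborate", "assist", "mutual aid"]) ])
  , ("domain_conflict", some ["attack", "annihilate", "enslave", "subjugate", "destroy", "harm", "damage"], some
      [ ("concept_lethal_force", ["destroy", "terminate"])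
      , ("concept_control_force", ["subjugate", "enslave"]) ])
  , ("domain_navigation", some ["approach", "avoid", "pursue", "retreat", "reposition"], none) ]

def get_concepts_from_text_py (text : String) : List String :=
  let text_lower := PySem.Str.lower text
  let extracted := pvOntology.foldl
    (fun acc d =>
      let acc :=
        match d.2.1 with        -- if "keywords" in domain_info
        | some kws => if kws.any (fun kw => PySem.Str.isIn kw text_lower) then acc ++ [d.1] else acc
        | none => acc
      match d.2.2 with          -- if "sub_concepts" in domain_info
      | some subs => subs.foldl
          (fun acc s => if s.2.any (fun kw => PySem.Str.isIn kw text_lower) then acc ++ [s.1] else acc) acc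
      | none => acc) []
  PySem.Set.ofList extracted    -- list(set(extracted)); first-occurrence order (Python's set order not modelled)

-- ===== PORT B =====
-- flat index built once from the ontology, as Source B builds _CONCEPT_TABLE
def pvConceptTable : List (String × List String) :=
  pvOntology.foldl
    (fun acc d =>
      let acc :=
        match d.2.1 with
        | some kws => acc ++ [(d.1, kws)]
        | none => acc
      acc ++ (d.2.2.getD []).foldl (fun acc s => acc ++ [(s.1, s.2)]) []) []

def get_concepts_from_text_py_alt (text : String) : List String :=
  let text_lower := PySem.Str.lower text
  let names := (pvConceptTable.filter
    (fun p => p.2.any (fun kw => PySem.Str.isIn kw text_lower))).map (fun p => p.1)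
  PySem.Set.ofList names

-- ===== PRECONDITION & SPEC =====
def Spec_get_concepts_from_text_py (text : String) (out : List String) : Prop := out = get_concepts_from_text_py_alt text
instance (text : String) (out : List String) : Decidable (Spec_get_concepts_from_text_py text out) := by unfold Spec_get_concepts_from_text_py; infer_instance

-- ===== CLAIM (what is proved, stated in full; the proofs are below) =====
def Claim_equal_get_concepts_from_text_py : Prop := ∀ (text : String), Dom_get_concepts_from_text_py text → Spec_get_concepts_from_text_py text (get_concepts_from_text_py text)

-- ===== LEMMAS AND PROOFS =====

-- a comprehension [x.1 for x in t if p x] is the left fold that appends each selected name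
theorem pvFilterMapEqFoldl (t : List (String × List String)) (p : String × List String → Bool)
    (acc : List String) :
    acc ++ (t.filter p).map Prod.fst
      = t.foldl (fun acc x => if p x then acc ++ [x.1] else acc) acc := by
  induction t generalizing acc with
  | nil => simp
  | cons h t ih =>
    by_cases hp : p h <;> simp [List.foldl, hp, ← ih]

-- ===== VERDICT (by name: the statement is the Claim_ definition above) =====
theorem get_concepts_from_text_py_spec : Claim_equal_get_concepts_from_text_py := by
  intro text _
  unfold Spec_get_concepts_from_text_py get_concepts_from_text_py get_concepts_from_text_py_alt
  refine congrArg PySem.Set.ofList ?_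
  rw [show (pvConceptTable.filter
        (fun p => p.2.any (fun kw => PySem.Str.isIn kw (PySem.Str.lower text)))).map
        (fun p => p.1)
      = [] ++ (pvConceptTable.filter
        (fun p => p.2.any (fun kw => PySem.Str.isIn kw (PySem.Str.lower text)))).map Prod.fst
      from rfl,
    pvFilterMapEqFoldl]
  rfl
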